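-- pv_equiv track=rewrite | github.com/Aarya2004/AOC2024 | brute_force/python/day8.py | find_antenna_locations
-- ===== SOURCE A (Python) =====
-- def find_antenna_locations(antenna_map):
--     seen_to_loc = {}
--     for i in range(len(antenna_map)):
--         for j in range(len(antenna_map[i])):
--             if antenna_map[i][j] != '.':
--                 if antenna_map[i][j] not in seen_to_loc:
--                     seen_to_loc[antenna_map[i][j]] = [(i, j)]
--                 else:
--                     seen_to_loc[antenna_map[i][j]].append((i, j))
--     return seen_to_loc
-- ===== SOURCE B (Python) =====
-- def find_antenna_locations(antenna_map):
--     # Flatten the grid into (symbol, location) pairs, then group by symbol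
--     # in first-occurrence order (instead of building the dict incrementally).
--     cells = [(ch, (i, j))
--              for i, row in enumerate(antenna_map)
--              for j, ch in enumerate(row)
--              if ch != '.']
--     order = list(dict.fromkeys(ch for ch, _ in cells))
--     return {sym: [loc for ch, loc in cells if ch == sym] for sym in order}
-- ===== Notes on version B (the rewrite author's own statement) =====
-- stated objective: alternative
-- what changed: Instead of scanning the grid with nested index loops and growing a dict cell by cell (insert new key / append to existing), B flattens the grid once into (symbol, location) pairs, dedups the symbols in first-occurrence order, and builds the result by grouping the pairs per symbol.
import Mathlib
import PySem

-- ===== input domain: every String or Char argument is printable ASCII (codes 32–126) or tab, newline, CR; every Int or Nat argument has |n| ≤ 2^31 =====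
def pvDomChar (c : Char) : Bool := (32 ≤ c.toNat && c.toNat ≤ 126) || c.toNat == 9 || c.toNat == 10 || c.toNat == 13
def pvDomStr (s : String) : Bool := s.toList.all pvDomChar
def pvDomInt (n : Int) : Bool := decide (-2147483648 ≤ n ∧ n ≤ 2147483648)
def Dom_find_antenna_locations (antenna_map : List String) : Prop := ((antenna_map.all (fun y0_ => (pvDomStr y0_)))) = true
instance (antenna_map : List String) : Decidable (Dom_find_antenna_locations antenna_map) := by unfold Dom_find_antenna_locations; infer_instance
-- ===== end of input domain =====

-- B flattens the grid into (symbol, location) pairs and groups them by first-occurrence symbol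
-- order, instead of building the dict incrementally cell by cell (objective: alternative).

-- ===== PORT A =====
-- nested index loops building a dict: new key -> insert singleton, seen key -> append (= modify)
def find_antenna_locations (antenna_map : List String) : List (String × List (Int × Int)) :=
  ((PySem.List.pyRange 0 (PySem.List.len antenna_map) 1).foldl (fun d i =>
    (PySem.List.pyRange 0 (PySem.Str.len (PySem.List.pyGetD antenna_map i "")) 1).foldl (fun d j =>
      -- antenna_map[i][j]: in-range string indexing, done on .toList (exact for in-range j)
      let c := PySem.List.pyGetD (PySem.List.pyGetD antenna_map i "").toList j ' '
      if c ≠ '.' then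
        if d.contains (String.ofList [c]) = false then d.insert (String.ofList [c]) [(i, j)]
        else d.modify (String.ofList [c]) [] (· ++ [(i, j)])
      else d) d)
    (PySem.Dict.empty : PySem.Dict String (List (Int × Int)))).items

-- ===== PORT B =====
-- the flattened [(ch, (i, j)) for i, row in enumerate(...) for j, ch in enumerate(row) if ch != '.']
def pvCells (antenna_map : List String) : List (String × (Int × Int)) :=
  (PySem.List.enumerate antenna_map).flatMap (fun p =>
    (PySem.List.enumerate p.2.toList).filterMap (fun q =>
      if q.2 ≠ '.' then some (String.ofList [q.2], (p.1, q.1)) else none))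

def find_antenna_locations_alt (antenna_map : List String) : List (String × List (Int × Int)) :=
  let cells := pvCells antenna_map
  let order := PySem.List.dedup (cells.map (·.1))
  -- dict comprehension over the distinct symbols (keys all distinct, so it appends in order)
  order.map (fun sym => (sym, (cells.filter (fun c => c.1 == sym)).map (·.2)))

-- ===== PRECONDITION & SPEC =====
def Spec_find_antenna_locations (antenna_map : List String) (out : List (String × List (Int × Int))) : Prop := out = find_antenna_locations_alt antenna_map
instance (antenna_map : List String) (out : List (String × List (Int × Int))) : Decidable (Spec_find_antenna_locations antenna_map out) := by unfold Spec_find_antenna_locations; infer_instance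

-- ===== CLAIM (what is proved, stated in full; the proofs are below) =====
def Claim_equal_find_antenna_locations : Prop := ∀ (antenna_map : List String), Dom_find_antenna_locations antenna_map → Spec_find_antenna_locations antenna_map (find_antenna_locations antenna_map)

-- ===== LEMMAS AND PROOFS =====

-- A's loop body as a step function on the flattened cell list
def pvStep (d : PySem.Dict String (List (Int × Int))) (p : String × (Int × Int)) :
    PySem.Dict String (List (Int × Int)) :=
  if d.contains p.1 = false then d.insert p.1 [p.2] else d.modify p.1 [] (· ++ [p.2])

theorem pvStep_eq_modify (d : PySem.Dict String (List (Int × Int))) (p : String × (Int × Int)) :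
    pvStep d p = d.modify p.1 [] (· ++ [p.2]) := by
  unfold pvStep
  by_cases h : d.contains p.1 = false
  · simp [h, PySem.Dict.insert, PySem.Dict.modify, PySem.Dict.getD_of_not_contains d [] h]
  · simp [h]

-- A's nested index loops are the fold of pvStep over the flattened cell list
theorem pvA_eq_foldl (antenna_map : List String) :
    find_antenna_locations antenna_map =
      ((pvCells antenna_map).foldl pvStep
        (PySem.Dict.empty : PySem.Dict String (List (Int × Int)))).items := by
  unfold find_antenna_locations pvCells
  rw [List.foldl_flatMap]
  rw [PySem.List.enumerate_eq_map_pyRange antenna_map "", List.foldl_map]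
  simp only [PySem.List.len_eq]
  refine congrArg _ ?_
  apply PySem.List.foldl_congr_mem
  intro d i _
  rw [List.foldl_filterMap]
  rw [PySem.List.enumerate_eq_map_pyRange (PySem.List.pyGetD antenna_map i "").toList ' ',
      List.foldl_map]
  simp only [PySem.Str.len_eq, PySem.List.len_eq]
  apply PySem.List.foldl_congr_mem
  intro d j _
  by_cases hc : PySem.List.pyGetD (PySem.List.pyGetD antenna_map i "").toList j ' ' = '.' <;>
    simp [hc, pvStep]

-- ===== VERDICT (by name: the statement is the Claim_ definition above) =====
theorem find_antenna_locations_spec : Claim_equal_find_antenna_locations := by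
  intro antenna_map _
  unfold Spec_find_antenna_locations
  rw [pvA_eq_foldl]
  unfold find_antenna_locations_alt
  have hstep : ((pvCells antenna_map).foldl pvStep
      (PySem.Dict.empty : PySem.Dict String (List (Int × Int)))) =
      ((pvCells antenna_map).foldl
        (fun d p => d.modify p.1 [] (· ++ [p.2]))
        (PySem.Dict.empty : PySem.Dict String (List (Int × Int)))) := by
    apply PySem.List.foldl_congr_mem
    exact fun d p _ => pvStep_eq_modify d p
  rw [hstep]
  have hnd : ((pvCells antenna_map).foldl
      (fun d p => d.modify p.1 [] (· ++ [p.2]))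
      (PySem.Dict.empty : PySem.Dict String (List (Int × Int)))).keys.Nodup := by
    exact PySem.Dict.nodup_keys_foldl_modify_key (pvCells antenna_map) Prod.fst []
      (fun _ p => (· ++ [p.2])) _ (by simp [PySem.Dict.keys_empty])
  rw [PySem.Dict.items_eq_map_keys _ hnd []]
  rw [PySem.Dict.keys_foldl_modify_key (pvCells antenna_map) Prod.fst []
      (fun _ p => (· ++ [p.2]))]
  simp only [PySem.Dict.keys_empty, PySem.List.dedup_eq_ofList]
  refine List.map_congr_left ?_
  intro k _
  rw [PySem.Dict.getD_foldl_modify_append]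
  simp [PySem.Dict.getD_empty]
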